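-- pv_equiv track=rewrite | github.com/kirkhellsten/CPS109---109-Python-Problems | labs109.py | duplicate_digit_bonus
-- ===== SOURCE A (Python) =====
-- def duplicate_digit_bonus(n):
--
--     if n <= 9:
--         return 0
--
--     result = 0
--
--     score = 0
--     lastDigit = n % 10
--     firstLastDigit = True
--     while n >= 1:
--         n = n // 10
--         nextLastDigit = n % 10
--         if lastDigit == nextLastDigit:
--             if score == 0:
--                 score = 1
--             else:
--                 score *= 10
--         else:
--             if firstLastDigit:
--                 score *= 2
--             result += score
--             score = 0
--             firstLastDigit = False
--
--         lastDigit = nextLastDigit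
--
--     result += score
--     return result
-- ===== SOURCE B (Python) =====
-- def _bonus(L, doubled):
--     # closed-form bonus of one maximal run of equal digits of length L
--     if L < 2:
--         return 0
--     return 2 * 10 ** (L - 2) if doubled else 10 ** (L - 2)
--
-- def _runs_score(m, d, run, is_last_run):
--     # m: digits still unread (above the current run), d: current run's digit,
--     # run: its length so far; the rightmost (least-significant) run is doubled
--     if m <= 0:
--         return _bonus(run, is_last_run)
--     if m % 10 == d:
--         return _runs_score(m // 10, d, run + 1, is_last_run)
--     return _bonus(run, is_last_run) + _runs_score(m // 10, m % 10, 1, False)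
--
-- def duplicate_digit_bonus(n):
--     if n <= 9:
--         return 0
--     return _runs_score(n // 10, n % 10, 1, True)
-- ===== Notes on version B (the rewrite author's own statement) =====
-- stated objective: alternative
-- what changed: Replaces A's single imperative loop with mutable score/result/flag state and an incremental running multiply by a recursive decomposition into maximal digit runs, each run scored by the closed form 10**(L-2) (doubled for the rightmost run).
import Mathlib
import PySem

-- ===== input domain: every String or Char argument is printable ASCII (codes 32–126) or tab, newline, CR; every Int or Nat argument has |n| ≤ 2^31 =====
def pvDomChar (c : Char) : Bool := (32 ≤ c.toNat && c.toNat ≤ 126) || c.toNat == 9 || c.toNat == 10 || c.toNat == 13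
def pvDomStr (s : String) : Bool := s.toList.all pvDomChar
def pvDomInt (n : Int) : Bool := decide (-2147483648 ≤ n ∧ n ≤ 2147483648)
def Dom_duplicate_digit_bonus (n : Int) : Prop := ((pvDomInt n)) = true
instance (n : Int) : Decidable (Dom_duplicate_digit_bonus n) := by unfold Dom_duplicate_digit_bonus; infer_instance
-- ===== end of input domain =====

-- B replaces A's imperative loop (mutable score/result/firstLastDigit with an incremental
-- running multiply) by a recursion over maximal digit runs, each run scored by the closed
-- form 10^(L-2), the rightmost run doubled; objective: alternative decomposition, same cost.

-- termination helper for both loops (cited by name in decreasing_by)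
theorem pv_fdiv_ten_toNat_lt (m : Int) (h : 1 ≤ m) :
    (PySem.Int.floordiv m 10).toNat < m.toNat := by
  rw [PySem.Int.floordiv_eq_ediv_of_pos (by norm_num)]
  omega

-- ===== PORT A =====
-- the while-loop of A, state (n, lastDigit, score, result, firstLastDigit)
def pvALoop (n lastDigit score result : Int) (firstLastDigit : Bool) : Int :=
  if h : 1 ≤ n then
    let n' := PySem.Int.floordiv n 10
    let nextLastDigit := PySem.Int.mod n' 10
    if lastDigit = nextLastDigit then
      pvALoop n' nextLastDigit (if score = 0 then 1 else score * 10) result firstLastDigit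
    else
      pvALoop n' nextLastDigit 0 (result + (if firstLastDigit then score * 2 else score)) false
  else
    result + score
termination_by n.toNat
decreasing_by all_goals exact pv_fdiv_ten_toNat_lt _ h

def duplicate_digit_bonus (n : Int) : Int :=
  if n ≤ 9 then 0
  else pvALoop n (PySem.Int.mod n 10) 0 0 true

-- ===== PORT B =====
-- closed-form bonus of one maximal run of length L (10 ** (L-2): exponent is ≥ 0 in that branch, so .toNat is exact)
def pvBonus (L : Int) (doubled : Bool) : Int :=
  if L < 2 then 0
  else if doubled then 2 * 10 ^ (L - 2).toNat else 10 ^ (L - 2).toNat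

def pvRunsScore (m d run : Int) (isLastRun : Bool) : Int :=
  if h : m ≤ 0 then
    pvBonus run isLastRun
  else if PySem.Int.mod m 10 = d then
    pvRunsScore (PySem.Int.floordiv m 10) d (run + 1) isLastRun
  else
    pvBonus run isLastRun +
      pvRunsScore (PySem.Int.floordiv m 10) (PySem.Int.mod m 10) 1 false
termination_by m.toNat
decreasing_by all_goals exact pv_fdiv_ten_toNat_lt _ (by omega)

def duplicate_digit_bonus_alt (n : Int) : Int :=
  if n ≤ 9 then 0
  else pvRunsScore (PySem.Int.floordiv n 10) (PySem.Int.mod n 10) 1 true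

-- ===== PRECONDITION & SPEC =====
def Spec_duplicate_digit_bonus (n : Int) (out : Int) : Prop := out = duplicate_digit_bonus_alt n
instance (n : Int) (out : Int) : Decidable (Spec_duplicate_digit_bonus n out) := by unfold Spec_duplicate_digit_bonus; infer_instance

-- ===== CLAIM (what is proved, stated in full; the proofs are below) =====
def Claim_equal_duplicate_digit_bonus : Prop := ∀ (n : Int), Dom_duplicate_digit_bonus n → Spec_duplicate_digit_bonus n (duplicate_digit_bonus n)

-- ===== LEMMAS AND PROOFS =====

-- A's running score after seeing a run of length `run` is pvBonus run false
theorem pv_score_step (run : Int) (h : 1 ≤ run) :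
    (if pvBonus run false = 0 then (1:Int) else pvBonus run false * 10) =
      pvBonus (run + 1) false := by
  unfold pvBonus
  by_cases h2 : run < 2
  · have : run = 1 := by omega
    subst this; norm_num
  · have hne : (10:Int) ^ (run - 2).toNat ≠ 0 := by positivity
    have h1 : ¬ run + 1 < 2 := by omega
    have h3 : (run + 1 - 2).toNat = (run - 2).toNat + 1 := by omega
    simp [h2, h1, hne, h3, pow_succ]

-- flushing A's score with the firstLastDigit flag is B's pvBonus with the doubled flag
theorem pv_score_flush (run : Int) (f : Bool) :
    (if f then pvBonus run false * 2 else pvBonus run false) = pvBonus run f := by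
  unfold pvBonus
  cases f <;> by_cases h : run < 2 <;> simp [h] <;> ring

-- main invariant: A's loop from a state inside a run of length `run` equals
-- result + B's run-wise score of the remaining digits
theorem pv_loop_eq (k : Nat) : ∀ (m run result : Int) (f : Bool),
    m.toNat ≤ k → 1 ≤ m → 1 ≤ run →
    pvALoop m (PySem.Int.mod m 10) (pvBonus run false) result f =
      result + pvRunsScore (PySem.Int.floordiv m 10) (PySem.Int.mod m 10) run f := by
  induction k with
  | zero => intro m run result f hk hm _; omega
  | succ k ih =>
    intro m run result f hk hm hrun
    have h10 : (0:Int) < 10 := by norm_num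
    rw [pvALoop]
    simp only [dif_pos hm]
    rw [pvRunsScore]
    by_cases hm' : 1 ≤ PySem.Int.floordiv m 10
    · -- more digits above: the loop continues against a real digit
      have hnz : ¬ PySem.Int.floordiv m 10 ≤ 0 := by omega
      have hlt : (PySem.Int.floordiv m 10).toNat ≤ k := by
        have := pv_fdiv_ten_toNat_lt m hm; omega
      simp only [dif_neg hnz]
      by_cases heq : PySem.Int.mod m 10 = PySem.Int.mod (PySem.Int.floordiv m 10) 10
      · -- same digit: the run grows by one
        rw [if_pos heq, if_pos heq.symm, pv_score_step run hrun, heq]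
        exact ih _ _ _ _ hlt hm' (by omega)
      · -- different digit: A flushes its score, B closes the run
        have heq' : ¬ PySem.Int.mod (PySem.Int.floordiv m 10) 10 = PySem.Int.mod m 10 :=
          fun h => heq h.symm
        rw [if_neg heq, if_neg heq', pv_score_flush run f]
        have h0 : (0:Int) = pvBonus 1 false := by decide
        rw [h0, ih _ _ _ _ hlt hm' le_rfl]
        ring
    · -- m is the last (leading) digit: the phantom next digit 0 never equals m % 10
      have hle : PySem.Int.floordiv m 10 ≤ 0 := by omega
      have hq : PySem.Int.floordiv m 10 = 0 := by
        rw [PySem.Int.floordiv_eq_ediv_of_pos h10] at hle ⊢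
        omega
      have hmd : ¬ PySem.Int.mod m 10 = 0 := by
        rw [PySem.Int.mod_eq_emod_of_pos h10]
        rw [PySem.Int.floordiv_eq_ediv_of_pos h10] at hq
        omega
      simp only [dif_pos hle]
      rw [hq]
      have hz : PySem.Int.mod (0:Int) 10 = 0 := by decide
      rw [hz, if_neg hmd, pvALoop]
      rw [dif_neg (by norm_num : ¬ (1:Int) ≤ 0)]
      rw [pv_score_flush run f]
      ring

-- ===== VERDICT (by name: the statement is the Claim_ definition above) =====
theorem duplicate_digit_bonus_spec : Claim_equal_duplicate_digit_bonus := by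
  intro n _
  unfold Spec_duplicate_digit_bonus duplicate_digit_bonus duplicate_digit_bonus_alt
  by_cases h : n ≤ 9
  · simp [h]
  · have h1 : 1 ≤ n := by omega
    simp only [if_neg h]
    have key := pv_loop_eq n.toNat n 1 0 true le_rfl h1 le_rfl
    rw [show pvBonus 1 false = (0:Int) from by decide] at key
    rw [key]
    ring
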